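-- pv_equiv track=rewrite | github.com/jrosseruk/AgentBreeder | src/evals/benchmarks/math_.py | extract_boxed_content
-- ===== SOURCE A (Python) =====
-- def extract_boxed_content(input_str):
--     """
--     Extracts all contents inside \boxed{...} from the input string.
--
--     Args:
--         input_str (str): The input string containing LaTeX code.
--
--     Returns:
--         list: A list of strings extracted from within each \boxed{...}.
--     """
--     boxed_contents = []
--     search_str = "\\boxed{"
--     start = 0
--
--     while True:
--         # Find the next occurrence of \boxed{
--         idx = input_str.find(search_str, start)
--         if idx == -1:
--             break  # No more \boxed{ found
--
--         # Initialize stack to handle nested braces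
--         stack = []
--         content_start = idx + len(search_str)
--         i = content_start
--
--         while i < len(input_str):
--             char = input_str[i]
--             if char == "{":
--                 stack.append("{")
--             elif char == "}":
--                 if stack:
--                     stack.pop()
--                 else:
--                     # Matching closing brace for \boxed{
--                     content_end = i
--                     boxed_content = input_str[content_start:content_end]
--                     boxed_contents.append(boxed_content)
--                     start = i + 1  # Update start position for next search
--                     break
--             i += 1
--         else:
--             # If loop completes without finding a matching '}', raise an error
--             raise ValueError("Unmatched '{' found in the input string.")
--
--     return boxed_contents
-- ===== SOURCE B (Python) =====
-- def extract_boxed_content(input_str):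
--     """Same extraction via a precomputed global brace-matching table (two passes)."""
--     # Pass 1: one scan builds match[open_index] = close_index for every matched "{".
--     match = {}
--     stack = []
--     for i, ch in enumerate(input_str):
--         if ch == "{":
--             stack.append(i)
--         elif ch == "}":
--             if stack:
--                 match[stack.pop()] = i
--     # Pass 2: walk the \boxed{ occurrences, reading each closing brace from the table.
--     results = []
--     cursor = 0
--     while True:
--         idx = input_str.find("\\boxed{", cursor)
--         if idx == -1:
--             return results
--         close = match.get(idx + 6)
--         if close is None:
--             raise ValueError("Unmatched '{' found in the input string.")
--         results.append(input_str[idx + 7:close])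
--         cursor = close + 1
-- ===== Notes on version B (the rewrite author's own statement) =====
-- stated objective: alternative
-- what changed: A rescans forward from every \boxed{ occurrence with a depth counter to locate its closing brace; B instead builds a global brace-matching table (stack of '{' indices, popped on '}') in one pass and then resolves each \boxed{ occurrence by a single table lookup.
import Mathlib
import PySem

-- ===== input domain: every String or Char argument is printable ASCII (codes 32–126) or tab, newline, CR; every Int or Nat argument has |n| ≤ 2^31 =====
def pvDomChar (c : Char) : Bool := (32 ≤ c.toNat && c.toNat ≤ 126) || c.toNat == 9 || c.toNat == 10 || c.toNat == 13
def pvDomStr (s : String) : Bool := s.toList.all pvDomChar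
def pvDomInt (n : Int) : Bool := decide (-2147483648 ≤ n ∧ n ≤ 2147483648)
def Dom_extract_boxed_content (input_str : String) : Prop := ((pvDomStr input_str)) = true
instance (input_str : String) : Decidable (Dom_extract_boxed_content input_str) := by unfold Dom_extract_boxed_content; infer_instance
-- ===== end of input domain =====

-- B replaces A's per-occurrence nested depth scan by ONE global pass building a brace-matching
-- table, so each \boxed{ occurrence finds its closing brace by a single table lookup (alternative
-- decomposition; same results, including which inputs raise — those are excluded by Pre_).

-- ===== PORT A =====
-- the literal "\boxed{" (length 7)
def ebcPat : List Char := ['\\', 'b', 'o', 'x', 'e', 'd', '{']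

-- A's inner while loop over positions i ≥ content_start, carrying the stack as its length d;
-- returns the offset (from content_start) of the matching '}', none = the loop runs off the end
-- (where Python raises ValueError).
def ebcScan : List Char → Nat → Option Nat
  | [], _ => none
  | c :: rest, d =>
    if c = '{' then (ebcScan rest (d + 1)).map (· + 1)
    else if c = '}' then
      if d ≠ 0 then (ebcScan rest (d - 1)).map (· + 1)
      else some 0
    else (ebcScan rest d).map (· + 1)

-- A's outer while True loop; fuel bounds the iterations (start strictly increases, so
-- cs.length + 1 iterations are never exhausted). input_str[a:b] on in-range a ≤ b is exactly
-- take/drop. On the ValueError path the port returns the list built so far (outside Pre_).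
def ebcLoopA (cs : List Char) : Nat → Nat → List String → List String
  | 0, _, acc => acc
  | fuel + 1, start, acc =>
    let r := PySem.Chars.findFrom cs ebcPat (start : Int)
    if r = -1 then acc
    else
      let idx := r.toNat
      match ebcScan (cs.drop (idx + 7)) 0 with
      | none => acc
      | some j => ebcLoopA cs fuel (idx + 7 + j + 1) (acc ++ [String.ofList ((cs.drop (idx + 7)).take j)])

def extract_boxed_content (input_str : String) : List String :=
  ebcLoopA input_str.toList (input_str.toList.length + 1) 0 []

-- ===== PORT B =====
-- B's pass 1: enumerate the characters, pushing '{' indices, popping on '}' into the table.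
def ebcPass : List Char → Nat → List Nat → PySem.Dict Nat Nat → PySem.Dict Nat Nat
  | [], _, _, tbl => tbl
  | c :: rest, i, stack, tbl =>
    if c = '{' then ebcPass rest (i + 1) (i :: stack) tbl
    else if c = '}' then
      match stack with
      | [] => ebcPass rest (i + 1) [] tbl
      | p :: s => ebcPass rest (i + 1) s (tbl.insert p i)
    else ebcPass rest (i + 1) stack tbl

-- B's pass 2: the cursor loop (same fuel bound as A's outer loop); match.get(idx+6) is the
-- table lookup; on the ValueError path the port returns the list built so far (outside Pre_).
def ebcLoopB (cs : List Char) (tbl : PySem.Dict Nat Nat) : Nat → Nat → List String → List String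
  | 0, _, acc => acc
  | fuel + 1, cursor, acc =>
    let r := PySem.Chars.findFrom cs ebcPat (cursor : Int)
    if r = -1 then acc
    else
      let idx := r.toNat
      match tbl.get? (idx + 6) with
      | none => acc
      | some close =>
          ebcLoopB cs tbl fuel (close + 1)
            (acc ++ [String.ofList ((cs.drop (idx + 7)).take (close - (idx + 7)))])

def extract_boxed_content_alt (input_str : String) : List String :=
  ebcLoopB input_str.toList (ebcPass input_str.toList 0 [] PySem.Dict.empty)
    (input_str.toList.length + 1) 0 []

-- ===== PRECONDITION & SPEC =====
-- Pre_ excludes exactly the inputs on which the Python A raises ValueError: those containing an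
-- occurrence of "\boxed{" whose brace is never closed (no prefix of the following text has more
-- '}' than '{'); B raises the same ValueError there.
def Pre_extract_boxed_content (input_str : String) : Prop :=
  ∀ i < input_str.toList.length,
    ebcPat.isPrefixOf (input_str.toList.drop i) = true →
    ∃ n < input_str.toList.length + 1,
      ((input_str.toList.drop (i + 7)).take n).count '}' >
        ((input_str.toList.drop (i + 7)).take n).count '{'
instance (input_str : String) : Decidable (Pre_extract_boxed_content input_str) := by
  unfold Pre_extract_boxed_content; infer_instance
def pvWitness_extract_boxed_content : String := "\\boxed{1+{2}} and \\boxed{x}"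

def Spec_extract_boxed_content (input_str : String) (out : List String) : Prop := out = extract_boxed_content_alt input_str
instance (input_str : String) (out : List String) : Decidable (Spec_extract_boxed_content input_str out) := by unfold Spec_extract_boxed_content; infer_instance

-- ===== CLAIM (what is proved, stated in full; the proofs are below) =====
def Claim_equal_extract_boxed_content : Prop := ∀ (input_str : String), Dom_extract_boxed_content input_str → Pre_extract_boxed_content input_str → Spec_extract_boxed_content input_str (extract_boxed_content input_str)

-- ===== LEMMAS AND PROOFS =====

-- a successful scan points inside the list
lemma ebcScan_lt_length (v : List Char) : ∀ d j, ebcScan v d = some j → j < v.length := by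
  induction v with
  | nil => intro d j h; simp [ebcScan] at h
  | cons c rest ih =>
    intro d j h
    simp only [ebcScan] at h
    split_ifs at h with h1 h2 h3
    · cases hr : ebcScan rest (d + 1) with
      | none => rw [hr] at h; simp at h
      | some j' => rw [hr] at h; simp at h; subst h; have := ih _ _ hr; simp; omega
    · cases hr : ebcScan rest (d - 1) with
      | none => rw [hr] at h; simp at h
      | some j' => rw [hr] at h; simp at h; subst h; have := ih _ _ hr; simp; omega
    · simp at h; subst h; simp
    · cases hr : ebcScan rest d with
      | none => rw [hr] at h; simp at h
      | some j' => rw [hr] at h; simp at h; subst h; have := ih _ _ hr; simp; omega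


-- a table entry for a key already matched survives the rest of the pass
lemma ebcPass_persist (v : List Char) :
    ∀ i st tbl (p j : Nat), p < i → p ∉ st → tbl.get? p = some j →
      (ebcPass v i st tbl).get? p = some j := by
  induction v with
  | nil => intro i st tbl p j _ _ h; simpa [ebcPass] using h
  | cons c rest ih =>
    intro i st tbl p j hpi hst h
    simp only [ebcPass]
    split_ifs with h1 h2
    · exact ih _ _ _ _ _ (by omega) (by simp [hst]; omega) h
    · match st with
      | [] => exact ih _ _ _ _ _ (by omega) (by simp) h
      | q :: s =>
        have hq : p ≠ q := fun he => hst (he ▸ List.mem_cons_self)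
        exact ih _ _ _ _ _ (by omega) (fun hm => hst (List.mem_cons_of_mem _ hm))
          (by rw [PySem.Dict.get?_insert_of_ne _ _ hq]; exact h)
    · exact ih _ _ _ _ _ (by omega) hst h


-- a key on the stack is matched exactly where A's depth scan (started at depth = its stack
-- position) terminates
lemma ebcPass_stack (v : List Char) :
    ∀ i st tbl (p k : Nat), st[k]? = some p →
      (∀ m, m < st.length → m ≠ k → st[m]? ≠ some p) →
      p < i → tbl.get? p = none →
      (ebcPass v i st tbl).get? p = (ebcScan v k).map (i + ·) := by
  induction v with
  | nil => intro i st tbl p k _ _ _ htbl; simpa [ebcPass, ebcScan] using htbl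
  | cons c rest ih =>
    intro i st tbl p k hk hdis hpi htbl
    by_cases h1 : c = '{'
    · rw [show ebcPass (c :: rest) i st tbl = ebcPass rest (i+1) (i :: st) tbl by
        simp [ebcPass, h1]]
      rw [show ebcScan (c :: rest) k = (ebcScan rest (k+1)).map (· + 1) by simp [ebcScan, h1]]
      rw [ih (i+1) (i :: st) tbl p (k+1) (by simpa using hk)
        (by intro m hm hmk
            match m with
            | 0 => simp; omega
            | m'+1 => simp only [List.getElem?_cons_succ]
                      exact hdis m' (by simpa using hm) (by omega))
        (by omega) htbl]
      cases ebcScan rest (k + 1) <;> simp <;> omega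
    · by_cases h2 : c = '}'
      · match st with
        | [] => simp at hk
        | q :: s =>
          rw [show ebcPass (c :: rest) i (q :: s) tbl = ebcPass rest (i+1) s (tbl.insert q i) by
            simp [ebcPass, h1, h2]]
          match k with
          | 0 =>
            have hq : q = p := by simpa using hk
            rw [hq]
            have hps : p ∉ s := by
              intro hmem
              obtain ⟨m, he⟩ := List.mem_iff_getElem?.mp hmem
              have hlt : m < s.length := (List.getElem?_eq_some_iff.mp he).1
              exact hdis (m+1) (by simp; omega) (by omega) (by simpa using he)
            rw [ebcPass_persist rest (i+1) s _ p i (by omega) hps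
              (PySem.Dict.get?_insert_self _ _ _)]
            rw [show ebcScan (c :: rest) 0 = some 0 by simp [ebcScan, h1, h2]]
            simp
          | k'+1 =>
            have hq : q ≠ p := fun he => hdis 0 (by simp) (by omega) (by simp [he])
            rw [ih (i+1) s (tbl.insert q i) p k' (by simpa using hk)
              (by intro m hm hmk
                  have := hdis (m+1) (by simp; omega) (by omega)
                  simpa using this)
              (by omega) (by rw [PySem.Dict.get?_insert_of_ne _ _ (Ne.symm hq)]; exact htbl)]
            rw [show ebcScan (c :: rest) (k'+1) = (ebcScan rest k').map (· + 1) by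
              simp [ebcScan, h1, h2]]
            cases ebcScan rest k' <;> simp <;> omega
      · rw [show ebcPass (c :: rest) i st tbl = ebcPass rest (i+1) st tbl by
          simp [ebcPass, h1, h2]]
        rw [show ebcScan (c :: rest) k = (ebcScan rest k).map (· + 1) by simp [ebcScan, h1, h2]]
        rw [ih (i+1) st tbl p k hk hdis (by omega) htbl]
        cases ebcScan rest k <;> simp <;> omega


-- the table at a '{' position equals A's depth-0 scan from the next position
lemma ebcPass_spec (v : List Char) :
    ∀ i st tbl (p : Nat), (∀ q ∈ st, q < i) → tbl.get? p = none → i ≤ p →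
      v[p - i]? = some '{' →
      (ebcPass v i st tbl).get? p = (ebcScan (v.drop (p - i + 1)) 0).map (fun j => p + 1 + j) := by
  induction v with
  | nil => intro i st tbl p _ _ _ hidx; simp at hidx
  | cons c rest ih =>
    intro i st tbl p hst htbl hip hidx
    rcases Nat.eq_or_lt_of_le hip with he | hlt
    · have he' : p = i := he.symm
      subst he'
      have hc : c = '{' := by simpa using hidx
      rw [show ebcPass (c :: rest) p st tbl = ebcPass rest (p+1) (p :: st) tbl by
        simp [ebcPass, hc]]
      rw [ebcPass_stack rest (p+1) (p :: st) tbl p 0 (by simp)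
        (by intro m hm hmk
            match m with
            | 0 => omega
            | m'+1 =>
              simp only [List.getElem?_cons_succ]
              intro hcon
              have hmem : p ∈ st := List.mem_of_getElem? hcon
              exact absurd (hst p hmem) (by omega))
        (by omega) htbl]
      simp
    · have hsub : p - i = (p - (i+1)) + 1 := by omega
      have hidx' : rest[p - (i+1)]? = some '{' := by
        rw [hsub] at hidx; simpa using hidx
      have hdrop : (c :: rest).drop (p - i + 1) = rest.drop (p - (i+1) + 1) := by
        rw [hsub]; simp
      rw [hdrop]
      by_cases h1 : c = '{'
      · rw [show ebcPass (c :: rest) i st tbl = ebcPass rest (i+1) (i :: st) tbl by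
          simp [ebcPass, h1]]
        exact ih (i+1) (i :: st) tbl p
          (by intro q hq
              rcases List.mem_cons.mp hq with h | h
              · omega
              · exact (hst q h).trans (by omega))
          htbl (by omega) hidx'
      · by_cases h2 : c = '}'
        · match st with
          | [] =>
            rw [show ebcPass (c :: rest) i [] tbl = ebcPass rest (i+1) [] tbl by
              simp [ebcPass, h1, h2]]
            exact ih (i+1) [] tbl p (by simp) htbl (by omega) hidx'
          | q :: s =>
            rw [show ebcPass (c :: rest) i (q :: s) tbl = ebcPass rest (i+1) s (tbl.insert q i) by
              simp [ebcPass, h1, h2]]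
            have hq : q < i := hst q List.mem_cons_self
            exact ih (i+1) s (tbl.insert q i) p
              (by intro x hx; exact (hst x (List.mem_cons_of_mem _ hx)).trans (by omega))
              (by rw [PySem.Dict.get?_insert_of_ne _ _ (by omega : p ≠ q)]; exact htbl)
              (by omega) hidx'
        · rw [show ebcPass (c :: rest) i st tbl = ebcPass rest (i+1) st tbl by
            simp [ebcPass, h1, h2]]
          exact ih (i+1) st tbl p
            (by intro q hq; exact (hst q hq).trans (by omega)) htbl (by omega) hidx'



lemma ebcTable_get (cs : List Char) (p : Nat) (h : cs[p]? = some '{') :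
    (ebcPass cs 0 [] PySem.Dict.empty).get? p
      = (ebcScan (cs.drop (p + 1)) 0).map (fun j => p + 1 + j) := by
  have := ebcPass_spec cs 0 [] PySem.Dict.empty p (by simp)
    (PySem.Dict.get?_empty _) (Nat.zero_le _) (by simpa using h)
  simpa using this


-- the two loops agree step by step
lemma ebcLoops_eq (cs : List Char) :
    ∀ fuel cursor acc, cursor ≤ cs.length →
      ebcLoopA cs fuel cursor acc
        = ebcLoopB cs (ebcPass cs 0 [] PySem.Dict.empty) fuel cursor acc := by
  intro fuel
  induction fuel with
  | zero => intro cursor acc _; rfl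
  | succ fuel ih =>
    intro cursor acc hc
    simp only [ebcLoopA, ebcLoopB]
    by_cases hr : PySem.Chars.findFrom cs ebcPat (cursor : Int) = -1
    · simp [hr]
    · rw [if_neg hr, if_neg hr]
      obtain ⟨hle, hpre, -⟩ := PySem.Chars.findFrom_natCast_spec cs ebcPat cursor hc hr
      set idx := (PySem.Chars.findFrom cs ebcPat (cursor : Int)).toNat with hidx
      obtain ⟨t, ht⟩ := hpre
      have h6 : cs[idx + 6]? = some '{' := by
        rw [← List.getElem?_drop, ← ht]
        rfl
      have hlen : idx + 7 ≤ cs.length := by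
        have h1 : (List.drop idx cs).length = ebcPat.length + t.length := by rw [← ht]; simp
        simp [ebcPat] at h1
        omega
      have htbl := ebcTable_get cs (idx + 6) h6
      rw [show idx + 6 + 1 = idx + 7 from by omega] at htbl
      rw [htbl]
      cases hs : ebcScan (cs.drop (idx + 7)) 0 with
      | none => simp
      | some j =>
        simp only [Option.map_some]
        have hj : j < (cs.drop (idx + 7)).length := ebcScan_lt_length _ _ _ hs
        rw [show idx + 6 + 1 + j - (idx + 7) = j from by omega,
            show idx + 6 + 1 + j + 1 = idx + 7 + j + 1 from by omega]
        exact ih (idx + 7 + j + 1) _ (by simp at hj; omega)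

-- ===== VERDICT (by name: the statement is the Claim_ definition above) =====
theorem extract_boxed_content_spec : Claim_equal_extract_boxed_content := by
  intro s _ _
  unfold Spec_extract_boxed_content extract_boxed_content extract_boxed_content_alt
  exact ebcLoops_eq s.toList (s.toList.length + 1) 0 [] (Nat.zero_le _)
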